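-- pv_equiv track=rewrite | github.com/mrveiss/AutoBot-AI | src/llm_interface_pkg/optimization/prompt_compressor.py | select_relevant_context
-- ===== SOURCE A (Python) =====
-- from typing import Any, Callable, Dict, List, Optional
--
-- def select_relevant_context(
--
--     query: str,
--     contexts: List[str],
--     max_contexts: int = 3,
-- ) -> List[str]:
--     """
--     Select most relevant context chunks for a query.
--
--     For RAG systems: Instead of including all retrieved documents,
--     select only the most relevant ones.
--
--     Args:
--         query: User query
--         contexts: Retrieved context chunks
--         max_contexts: Maximum contexts to include
--
--     Returns:
--         List of most relevant contexts
--     """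
--     if len(contexts) <= max_contexts:
--         return contexts
--
--     # Simple relevance scoring (word overlap)
--     query_words = set(query.lower().split())
--
--     scored_contexts = []
--     for ctx in contexts:
--         ctx_words = set(ctx.lower().split())
--         overlap = len(query_words & ctx_words)
--         scored_contexts.append((overlap, ctx))
--
--     # Sort by relevance and take top N
--     scored_contexts.sort(reverse=True, key=lambda x: x[0])
--     return [ctx for _, ctx in scored_contexts[:max_contexts]]
-- ===== SOURCE B (Python) =====
-- def select_relevant_context(query, contexts, max_contexts=3):
--     if len(contexts) <= max_contexts:
--         return contexts
--
--     query_words = set(query.lower().split())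
--
--     # Bucket contexts by overlap score, keeping original order inside a bucket.
--     buckets = {}
--     for ctx in contexts:
--         score = len(query_words & set(ctx.lower().split()))
--         buckets.setdefault(score, []).append(ctx)
--
--     # Concatenate buckets from the highest score downwards, then slice.
--     ordered = []
--     for score in sorted(buckets, reverse=True):
--         ordered.extend(buckets[score])
--     return ordered[:max_contexts]
-- ===== Notes on version B (the rewrite author's own statement) =====
-- stated objective: alternative
-- what changed: Replaces A's stable reverse sort of the scored (overlap, ctx) list with a single bucketing pass into a dict keyed by score, then concatenates the buckets over the distinct scores sorted descending and slices the result.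
import Mathlib
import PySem

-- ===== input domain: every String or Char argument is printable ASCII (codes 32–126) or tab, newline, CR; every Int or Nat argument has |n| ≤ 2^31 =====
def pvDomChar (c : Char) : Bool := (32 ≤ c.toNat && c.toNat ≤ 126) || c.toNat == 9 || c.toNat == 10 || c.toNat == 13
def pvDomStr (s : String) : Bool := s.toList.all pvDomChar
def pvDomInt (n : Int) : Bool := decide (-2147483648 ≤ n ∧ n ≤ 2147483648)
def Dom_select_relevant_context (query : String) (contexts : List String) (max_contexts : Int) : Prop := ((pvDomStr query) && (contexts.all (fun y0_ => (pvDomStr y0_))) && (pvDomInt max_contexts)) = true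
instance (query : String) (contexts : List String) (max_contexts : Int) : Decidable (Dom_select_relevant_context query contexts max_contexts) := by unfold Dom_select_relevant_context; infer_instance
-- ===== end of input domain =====

-- B buckets contexts by overlap score in one dict pass and concatenates the buckets by
-- descending score, replacing A's stable sort of the scored list (objective: alternative).

-- ===== PORT A =====
def select_relevant_context (query : String) (contexts : List String) (max_contexts : Int) : List String :=
  if (contexts.length : Int) ≤ max_contexts then contexts
  else
    let query_words := PySem.Set.ofList (PySem.Str.split₀ (PySem.Str.lower query))
    let scored_contexts : List (Int × String) := contexts.foldl (fun acc ctx =>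
      let ctx_words := PySem.Set.ofList (PySem.Str.split₀ (PySem.Str.lower ctx))
      let overlap : Int := PySem.Set.len (PySem.Set.inter query_words ctx_words)
      acc ++ [(overlap, ctx)]) []
    let sorted := PySem.List.sorted scored_contexts (fun x => x.1) true
    (PySem.List.slice sorted none (some max_contexts)).map (fun x => x.2)

-- ===== PORT B =====
def select_relevant_context_alt (query : String) (contexts : List String) (max_contexts : Int) : List String :=
  if (contexts.length : Int) ≤ max_contexts then contexts
  else
    let query_words := PySem.Set.ofList (PySem.Str.split₀ (PySem.Str.lower query))
    let buckets : PySem.Dict Int (List String) := contexts.foldl (fun d ctx =>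
      let score : Int := PySem.Set.len (PySem.Set.inter query_words
        (PySem.Set.ofList (PySem.Str.split₀ (PySem.Str.lower ctx))))
      d.modify score [] (fun b => b ++ [ctx])) PySem.Dict.empty
    let ordered := (PySem.List.sorted buckets.keys (fun k => k) true).foldl
      (fun acc k => acc ++ buckets.getD k []) []
    PySem.List.slice ordered none (some max_contexts)

-- ===== PRECONDITION & SPEC =====
def Spec_select_relevant_context (query : String) (contexts : List String) (max_contexts : Int) (out : List String) : Prop := out = select_relevant_context_alt query contexts max_contexts
instance (query : String) (contexts : List String) (max_contexts : Int) (out : List String) : Decidable (Spec_select_relevant_context query contexts max_contexts out) := by unfold Spec_select_relevant_context; infer_instance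

-- ===== CLAIM (what is proved, stated in full; the proofs are below) =====
def Claim_equal_select_relevant_context : Prop := ∀ (query : String) (contexts : List String) (max_contexts : Int), Dom_select_relevant_context query contexts max_contexts → Spec_select_relevant_context query contexts max_contexts (select_relevant_context query contexts max_contexts)

-- ===== LEMMAS AND PROOFS =====

-- insertBy skips a prefix no element of which triggers an insertion
theorem pv_insertBy_append_skip {α : Type} (before : α → α → Bool) (x : α) (l m : List α)
    (h : ∀ y ∈ l, before x y = false) :
    PySem.List.insertBy before x (l ++ m) = l ++ PySem.List.insertBy before x m := by
  induction l with
  | nil => simp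
  | cons y ys ih =>
    simp only [List.cons_append, PySem.List.insertBy, h y (by simp)]
    simp only [Bool.false_eq_true, if_false, List.cons.injEq, true_and]
    exact ih (fun z hz => h z (by simp [hz]))

-- insertBy puts x at the front when every element would be inserted before
theorem pv_insertBy_cons_all {α : Type} (before : α → α → Bool) (x : α) (m : List α)
    (h : ∀ y ∈ m, before x y = true) :
    PySem.List.insertBy before x m = x :: m := by
  cases m with
  | nil => rfl
  | cons y ys => simp [PySem.List.insertBy, h y (by simp)]

-- inserting x into a bucket concatenation appends x at the end of its own bucket
theorem pv_insertBy_buckets {α : Type} (key : α → Int) (x : α) (xs : List α) (ks : List Int)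
    (hks : ks.Pairwise (· > ·)) (hx : key x ∈ ks) :
    PySem.List.insertBy (fun a b => decide (key b < key a)) x
        (ks.flatMap (fun k => xs.filter (fun a => key a == k)))
      = ks.flatMap (fun k => xs.filter (fun a => key a == k)
          ++ if key x == k then [x] else []) := by
  induction ks with
  | nil => simp at hx
  | cons k ks ih =>
    rcases List.pairwise_cons.1 hks with ⟨hhead, htail⟩
    simp only [List.flatMap_cons]
    by_cases hk : key x = k
    · have hB : ∀ y ∈ xs.filter (fun a => key a == k), (fun a b => decide (key b < key a)) x y = false := by
        intro y hy
        have := List.of_mem_filter hy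
        simp only [beq_iff_eq] at this
        simp [this, hk]
      have hrest : ∀ y ∈ ks.flatMap (fun k => xs.filter (fun a => key a == k)),
          (fun a b => decide (key b < key a)) x y = true := by
        intro y hy
        rcases List.mem_flatMap.1 hy with ⟨k', hk', hy'⟩
        have := List.of_mem_filter hy'
        simp only [beq_iff_eq] at this
        have : key y < key x := by rw [this, hk]; exact hhead k' hk'
        simpa using this
      rw [pv_insertBy_append_skip _ _ _ _ hB, pv_insertBy_cons_all _ _ _ hrest]
      have htail_eq : ks.flatMap (fun k' => xs.filter (fun a => key a == k')
            ++ if key x == k' then [x] else [])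
          = ks.flatMap (fun k' => xs.filter (fun a => key a == k')) := by
        apply List.flatMap_congr
        intro k' hk'
        have : key x ≠ k' := by rw [hk]; exact ne_of_gt (hhead k' hk')
        simp [this]
      rw [htail_eq]
      simp [hk]
    · have hx' : key x ∈ ks := by simpa [hk] using hx
      have hlt : key x < k := hhead _ hx'
      have hB : ∀ y ∈ xs.filter (fun a => key a == k), (fun a b => decide (key b < key a)) x y = false := by
        intro y hy
        have := List.of_mem_filter hy
        simp only [beq_iff_eq] at this
        simp [this]
        omega
      rw [pv_insertBy_append_skip _ _ _ _ hB, ih htail hx']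
      have : (key x == k) = false := by simpa using hk
      simp [this]

-- A stable reverse sort is the concatenation of the key buckets in descending key order
theorem pv_sorted_rev_eq_buckets {α : Type} (key : α → Int) (xs : List α) (ks : List Int)
    (hks : ks.Pairwise (· > ·)) (hmem : ∀ a ∈ xs, key a ∈ ks) :
    PySem.List.sorted xs key true
      = ks.flatMap (fun k => xs.filter (fun a => key a == k)) := by
  induction xs using List.reverseRecOn with
  | nil => simp [PySem.List.sorted]
  | append_singleton xs x ih =>
    rw [PySem.List.sorted_rev_eq_foldl_insertBy, List.foldl_append]
    simp only [List.foldl_cons, List.foldl_nil]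
    rw [← PySem.List.sorted_rev_eq_foldl_insertBy]
    rw [ih (fun a ha => hmem a (by simp [ha]))]
    rw [pv_insertBy_buckets key x xs ks hks (hmem x (by simp))]
    apply List.flatMap_congr
    intro k hk
    rw [List.filter_append]
    congr 1
    simp [List.filter_singleton, beq_iff_eq]

theorem pv_map_slice_to {α β : Type} (f : α → β) (xs : List α) (b : Int) :
    (PySem.List.slice xs none (some b)).map f = PySem.List.slice (xs.map f) none (some b) := by
  simp [PySem.List.slice, List.map_take]

-- ===== VERDICT (by name: the statement is the Claim_ definition above) =====
theorem select_relevant_context_spec : Claim_equal_select_relevant_context := by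
  intro query contexts max_contexts _
  unfold Spec_select_relevant_context select_relevant_context select_relevant_context_alt
  by_cases hlen : (contexts.length : Int) ≤ max_contexts
  · simp [hlen]
  · simp only [hlen, if_false]
    set q := PySem.Set.ofList (PySem.Str.split₀ (PySem.Str.lower query)) with hq
    set score : String → Int := fun c =>
      PySem.Set.len (PySem.Set.inter q (PySem.Set.ofList (PySem.Str.split₀ (PySem.Str.lower c)))) with hscore
    -- A's scored list is a map
    have hsc : contexts.foldl (fun acc ctx =>
        acc ++ [(score ctx, ctx)]) ([] : List (Int × String))
        = contexts.map (fun c => (score c, c)) := by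
      simpa using PySem.List.foldl_append_singleton_eq_map (fun c => (score c, c)) contexts []
    set scored := contexts.map (fun c => (score c, c)) with hscored
    -- B's dict as a fold over the scored pairs
    have hbuck : contexts.foldl (fun d ctx =>
          d.modify (score ctx) [] (fun b => b ++ [ctx])) PySem.Dict.empty
        = scored.foldl (fun d p => d.modify p.1 [] (fun b => b ++ [p.2])) PySem.Dict.empty := by
      rw [hscored, List.foldl_map]
    set buckets := scored.foldl (fun d p => d.modify p.1 [] (fun b => b ++ [p.2])) PySem.Dict.empty
      with hbuckets
    -- the dict's keys are the distinct scores in first-occurrence order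
    have hkeys : buckets.keys = PySem.Set.ofList (contexts.map score) := by
      rw [hbuckets, hscored, List.foldl_map]
      rw [PySem.Dict.keys_foldl_modify_key contexts score [] (fun _ c => (fun b => b ++ [c]))]
      simp [PySem.Set.update_eq_append_filter, PySem.Dict.keys_empty]
    have hgetD : ∀ k, buckets.getD k []
        = (scored.filter (fun p => p.1 == k)).map (fun p => p.2) := by
      intro k
      rw [hbuckets, PySem.Dict.getD_foldl_modify_append]
      simp
    set ks := PySem.List.sorted (PySem.Set.ofList (contexts.map score)) (fun k => k) true with hks
    have hnodup : ks.Nodup :=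
      (PySem.List.sorted_perm _ _ _).symm.nodup (PySem.Set.nodup_ofList _)
    have hpair : ks.Pairwise (· > ·) := by
      have h1 := PySem.List.sorted_pairwise_rev (PySem.Set.ofList (contexts.map score)) (fun k => k)
      exact (h1.and hnodup).imp (fun {a b} h => lt_of_le_of_ne h.1 (Ne.symm h.2))
    have hmem : ∀ p ∈ scored, (fun x : Int × String => x.1) p ∈ ks := by
      intro p hp
      rw [hks, PySem.List.mem_sorted, PySem.Set.mem_ofList]
      rcases List.mem_map.1 hp with ⟨c, hc, rfl⟩
      exact List.mem_map.2 ⟨c, hc, rfl⟩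
    rw [hsc, hbuck, hkeys]
    rw [PySem.List.foldl_append_eq_flatMap (fun k => buckets.getD k []) ks []]
    rw [pv_map_slice_to]
    simp only [List.nil_append]
    congr 1
    rw [pv_sorted_rev_eq_buckets (fun x => x.1) scored ks hpair hmem]
    rw [List.map_flatMap]
    apply List.flatMap_congr
    intro k hk
    rw [hgetD k]
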